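-- pv_equiv track=rewrite | github.com/skimura1/aoc_2024 | day_1/main.py | part_2
-- ===== SOURCE A (Python) =====
-- from collections import Counter
--
-- def part_2(items_to_count: list[int], items: list[int]) -> int:
--     sum = 0
--
--     item_counts = Counter(items)
--     unique_items_to_count = set(items_to_count)
--     filtered_count = {item: item_counts[item] for item in unique_items_to_count}
--
--     for num in items_to_count:
--         sum += num * filtered_count[num]
--
--     return sum
-- ===== SOURCE B (Python) =====
-- from collections import Counter
--
-- def part_2(items_to_count: list[int], items: list[int]) -> int:
--     c1 = Counter(items_to_count)
--     c2 = Counter(items)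
--     total = 0
--     for key, freq in c1.items():
--         total += key * freq * c2[key]
--     return total
-- ===== Notes on version B (the rewrite author's own statement) =====
-- stated objective: alternative
-- what changed: B groups items_to_count into a Counter and sums key*multiplicity*count over the distinct keys, instead of A's per-element loop over items_to_count through an intermediate filtered dict; the full-list traversal with a lookup per element is replaced by one pass over unique keys weighted by multiplicity.
import Mathlib
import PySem

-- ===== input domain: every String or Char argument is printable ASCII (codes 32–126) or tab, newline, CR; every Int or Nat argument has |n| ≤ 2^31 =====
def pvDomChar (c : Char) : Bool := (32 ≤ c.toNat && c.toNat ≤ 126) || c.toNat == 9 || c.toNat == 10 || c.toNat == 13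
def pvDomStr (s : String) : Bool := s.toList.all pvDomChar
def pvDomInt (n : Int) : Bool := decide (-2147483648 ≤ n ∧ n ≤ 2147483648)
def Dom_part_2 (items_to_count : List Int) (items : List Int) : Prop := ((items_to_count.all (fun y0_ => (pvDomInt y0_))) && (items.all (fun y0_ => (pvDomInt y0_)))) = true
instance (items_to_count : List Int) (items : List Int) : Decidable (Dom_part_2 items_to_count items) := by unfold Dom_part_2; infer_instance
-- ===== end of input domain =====

-- B replaces A's per-element loop (via an intermediate filtered dict) by a sum over the
-- distinct keys of Counter(items_to_count), weighted by their multiplicity.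


-- ===== PORT A =====
def part_2 (items_to_count : List Int) (items : List Int) : Int :=
  let item_counts := PySem.Dict.counter items
  let unique_items_to_count := PySem.Set.ofList items_to_count
  let filtered_count :=
    unique_items_to_count.foldl
      (fun d item => d.insert item (item_counts.getD item 0)) PySem.Dict.empty
  items_to_count.foldl (fun s num => s + num * filtered_count.getD num 0) 0

-- ===== PORT B =====
def part_2_alt (items_to_count : List Int) (items : List Int) : Int :=
  let c1 := PySem.Dict.counter items_to_count
  let c2 := PySem.Dict.counter items
  c1.items.foldl (fun total kf => total + kf.1 * kf.2 * c2.getD kf.1 0) 0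

-- ===== PRECONDITION & SPEC =====
def Spec_part_2 (items_to_count : List Int) (items : List Int) (out : Int) : Prop := out = part_2_alt items_to_count items
instance (items_to_count : List Int) (items : List Int) (out : Int) : Decidable (Spec_part_2 items_to_count items out) := by unfold Spec_part_2; infer_instance

-- ===== CLAIM (what is proved, stated in full; the proofs are below) =====
def Claim_equal_part_2 : Prop := ∀ (items_to_count : List Int) (items : List Int), Dom_part_2 items_to_count items → Spec_part_2 items_to_count items (part_2 items_to_count items)

-- ===== LEMMAS AND PROOFS =====

-- A's filtered dict maps each num appearing in items_to_count to items.count num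
lemma filtered_getD (itc items : List Int) (num : Int) (h : num ∈ itc) :
    ((PySem.Set.ofList itc).foldl
      (fun d item => d.insert item ((PySem.Dict.counter items).getD item 0))
      PySem.Dict.empty).getD num 0 = (items.count num : Int) := by
  set u := PySem.Set.ofList itc with hu
  have hnd : u.Nodup := PySem.Set.nodup_ofList itc
  have hmem : num ∈ u := (PySem.Set.mem_ofList itc num).2 h
  have hitems := PySem.Dict.items_foldl_insert_fresh u
      (k := fun x => x) (v := fun item => (PySem.Dict.counter items).getD item 0)
      (d := PySem.Dict.empty) (by intro a _; simp) (by simpa using hnd)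
  have hkeys : (u.foldl (fun d item => d.insert item ((PySem.Dict.counter items).getD item 0))
      PySem.Dict.empty).keys.Nodup :=
    PySem.Dict.nodup_keys_foldl_insert u _ PySem.Dict.empty (by simp)
  have hpair : (num, ((PySem.Dict.counter items).getD num 0)) ∈
      (u.foldl (fun d item => d.insert item ((PySem.Dict.counter items).getD item 0))
        PySem.Dict.empty).items := by
    rw [hitems]; simp
    exact Or.inr hmem
  have := PySem.Dict.getD_of_mem_items _ hpair hkeys 0
  rw [this, PySem.Dict.getD_counter]

-- grouping: summing f over a list equals summing count·f over its distinct elements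
lemma sum_group (l : List Int) (f : Int → Int) :
    (l.map f).sum = ((PySem.Set.ofList l).map (fun k => (l.count k : Int) * f k)).sum := by
  have h1 : (l.map f).sum = ∑ m ∈ l.toFinset, l.count m • f m :=
    Finset.sum_list_map_count l f
  have hnd : (PySem.Set.ofList l).Nodup := PySem.Set.nodup_ofList l
  have h2 : ((PySem.Set.ofList l).map (fun k => (l.count k : Int) * f k)).sum
      = ∑ m ∈ (PySem.Set.ofList l).toFinset, (l.count m : Int) * f m :=
    (List.sum_toFinset (fun k => (l.count k : Int) * f k) hnd).symm
  have h3 : (PySem.Set.ofList l).toFinset = l.toFinset := by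
    ext x; simp [PySem.Set.mem_ofList]
  rw [h2, h3, h1]
  apply Finset.sum_congr rfl
  intro m _
  simp

-- ===== VERDICT (by name: the statement is the Claim_ definition above) =====
theorem part_2_spec : Claim_equal_part_2 := by
  intro itc items _
  unfold Spec_part_2 part_2 part_2_alt
  simp only []
  rw [PySem.List.foldl_congr_mem itc _
      (fun s num => s + num * (items.count num : Int)) 0
      (by intro acc x hx; rw [filtered_getD itc items x hx]),
    PySem.Dict.items_counter]
  rw [PySem.List.foldl_add (g := fun num => num * (items.count num : Int))]
  rw [PySem.List.foldl_add (g := fun kf : Int × Int => kf.1 * kf.2 * (PySem.Dict.counter items).getD kf.1 0)]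
  simp only [zero_add, List.map_map]
  rw [sum_group itc (fun num => num * (items.count num : Int))]
  congr 1
  apply List.map_congr_left
  intro k _
  simp [PySem.Dict.getD_counter]
  ring
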